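-- pv_equiv track=rewrite | github.com/catalystforyou/homepage | scripts/update_pubs.py | decode_latex
-- ===== SOURCE A (Python) =====
-- def decode_latex(text):
--     """
--     Simple decoder for common LaTeX accents and special characters.
--     """
--     if not text:
--         return ""
--
--     replacements = [
--         (r"{\\'a}", "á"), (r"\\'a", "á"),
--         (r"{\\'e}", "é"), (r"\\'e", "é"),
--         (r"{\\'i}", "í"), (r"\\'i", "í"),
--         (r"{\\'o}", "ó"), (r"\\'o", "ó"),
--         (r"{\\'u}", "ú"), (r"\\'u", "ú"),
--         (r"{\\'c}", "ć"), (r"\\'c", "ć"),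
--         (r"{\\'n}", "ń"), (r"\\'n", "ń"),
--         (r"{\\'s}", "ś"), (r"\\'s", "ś"),
--         (r"{\\'z}", "ź"), (r"\\'z", "ź"),
--         (r"{\\`a}", "à"), (r"\\`a", "à"),
--         (r"{\\`e}", "è"), (r"\\`e", "è"),
--         (r"{\\`i}", "ì"), (r"\\`i", "ì"),
--         (r"{\\`o}", "ò"), (r"\\`o", "ò"),
--         (r"{\\`u}", "ù"), (r"\\`u", "ù"),
--         (r"{\\\"a}", "ä"), (r"\\\"a", "ä"),
--         (r"{\\\"e}", "ë"), (r"\\\"e", "ë"),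
--         (r"{\\\"i}", "ï"), (r"\\\"i", "ï"),
--         (r"{\\\"o}", "ö"), (r"\\\"o", "ö"),
--         (r"{\\\"u}", "ü"), (r"\\\"u", "ü"),
--         (r"{\\^a}", "â"), (r"\\^a", "â"),
--         (r"{\\^e}", "ê"), (r"\\^e", "ê"),
--         (r"{\\^i}", "î"), (r"\\^i", "î"),
--         (r"{\\^o}", "ô"), (r"\\^o", "ô"),
--         (r"{\\^u}", "û"), (r"\\^u", "û"),
--         (r"{\\~n}", "ñ"), (r"\\~n", "ñ"),
--         (r"{\\c{c}}", "ç"), (r"\\c{c}", "ç"),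
--         (r"{\\aa}", "å"), (r"\\aa", "å"),
--         (r"{\\o}", "ø"), (r"\\o", "ø"),
--         (r"{\\ss}", "ß"), (r"\\ss", "ß"),
--         (r"---", "—"), (r"--", "–"),
--         (r"{", ""), (r"}", "") # Remove remaining braces
--     ]
--
--     for pattern, replacement in replacements:
--         text = text.replace(pattern, replacement)
--     return text
-- ===== SOURCE B (Python) =====
-- def decode_latex(text):
--     """
--     Simple decoder for common LaTeX accents and special characters.
--
--     The replacement table is generated from a compact spec (accent mark x
--     letters, plus a few specials), braced variant before the bare one, and
--     applied in a single left-to-right scan: at each position the first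
--     applicable pattern in table order fires, otherwise the character is copied.
--     """
--     groups = [
--         ("'", "aeiou cnsz", "áéíóú ćńśź"),
--         ("`", "aeiou", "àèìòù"),
--         ('\\"', "aeiou", "äëïöü"),
--         ("^", "aeiou", "âêîôû"),
--         ("~", "n", "ñ"),
--     ]
--     specials = [("c{c}", "ç"), ("aa", "å"), ("o", "ø"), ("ss", "ß")]
--
--     table = []
--     for mark, letters, repls in groups:
--         for letter, repl in zip(letters, repls):
--             if letter == " ":
--                 continue
--             core = "\\\\" + mark + letter
--             table.append(("{" + core + "}", repl))
--             table.append((core, repl))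
--     for body, repl in specials:
--         core = "\\\\" + body
--         table.append(("{" + core + "}", repl))
--         table.append((core, repl))
--     table.extend([("---", "\u2014"), ("--", "\u2013"), ("{", ""), ("}", "")])
--
--     out = []
--     i, n = 0, len(text)
--     while i < n:
--         for p, r in table:
--             if text.startswith(p, i):
--                 out.append(r)
--                 i += len(p)
--                 break
--         else:
--             out.append(text[i])
--             i += 1
--     return "".join(out)
-- ===== Notes on version B (the rewrite author's own statement) =====
-- stated objective: alternative
-- what changed: A hard-codes 62 (pattern, replacement) pairs and runs 62 sequential global str.replace passes; B generates the table from a compact spec (accent mark x letter groups plus specials, braced variant before bare) and decodes in ONE left-to-right scan applying the first matching pattern at each position, equal to A because replacements are non-ASCII and the table order rules out re-matching.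
import Mathlib
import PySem

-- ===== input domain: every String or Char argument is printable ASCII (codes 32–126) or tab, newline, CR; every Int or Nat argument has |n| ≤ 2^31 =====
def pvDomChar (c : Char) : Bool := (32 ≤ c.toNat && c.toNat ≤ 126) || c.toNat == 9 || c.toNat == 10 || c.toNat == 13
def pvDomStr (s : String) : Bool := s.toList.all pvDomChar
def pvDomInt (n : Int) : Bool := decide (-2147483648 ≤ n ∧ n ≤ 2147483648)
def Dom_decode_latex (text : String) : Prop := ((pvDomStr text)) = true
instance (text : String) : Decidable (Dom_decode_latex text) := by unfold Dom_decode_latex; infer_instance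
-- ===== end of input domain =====

-- B generates the replacement table from a compact spec and replaces A's 62 sequential global
-- str.replace passes by ONE left-to-right first-match scan (objective: alternative algorithm).

-- ===== PORT A =====
-- A's hard-coded replacement table, in A's order
def pvReplacementsA : List (String × String) := [
  ("{\\\\'a}", "á"),
  ("\\\\'a", "á"),
  ("{\\\\'e}", "é"),
  ("\\\\'e", "é"),
  ("{\\\\'i}", "í"),
  ("\\\\'i", "í"),
  ("{\\\\'o}", "ó"),
  ("\\\\'o", "ó"),
  ("{\\\\'u}", "ú"),
  ("\\\\'u", "ú"),
  ("{\\\\'c}", "ć"),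
  ("\\\\'c", "ć"),
  ("{\\\\'n}", "ń"),
  ("\\\\'n", "ń"),
  ("{\\\\'s}", "ś"),
  ("\\\\'s", "ś"),
  ("{\\\\'z}", "ź"),
  ("\\\\'z", "ź"),
  ("{\\\\`a}", "à"),
  ("\\\\`a", "à"),
  ("{\\\\`e}", "è"),
  ("\\\\`e", "è"),
  ("{\\\\`i}", "ì"),
  ("\\\\`i", "ì"),
  ("{\\\\`o}", "ò"),
  ("\\\\`o", "ò"),
  ("{\\\\`u}", "ù"),
  ("\\\\`u", "ù"),
  ("{\\\\\\\"a}", "ä"),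
  ("\\\\\\\"a", "ä"),
  ("{\\\\\\\"e}", "ë"),
  ("\\\\\\\"e", "ë"),
  ("{\\\\\\\"i}", "ï"),
  ("\\\\\\\"i", "ï"),
  ("{\\\\\\\"o}", "ö"),
  ("\\\\\\\"o", "ö"),
  ("{\\\\\\\"u}", "ü"),
  ("\\\\\\\"u", "ü"),
  ("{\\\\^a}", "â"),
  ("\\\\^a", "â"),
  ("{\\\\^e}", "ê"),
  ("\\\\^e", "ê"),
  ("{\\\\^i}", "î"),
  ("\\\\^i", "î"),
  ("{\\\\^o}", "ô"),
  ("\\\\^o", "ô"),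
  ("{\\\\^u}", "û"),
  ("\\\\^u", "û"),
  ("{\\\\~n}", "ñ"),
  ("\\\\~n", "ñ"),
  ("{\\\\c{c}}", "ç"),
  ("\\\\c{c}", "ç"),
  ("{\\\\aa}", "å"),
  ("\\\\aa", "å"),
  ("{\\\\o}", "ø"),
  ("\\\\o", "ø"),
  ("{\\\\ss}", "ß"),
  ("\\\\ss", "ß"),
  ("---", "—"),
  ("--", "–"),
  ("{", ""),
  ("}", "")]

def decode_latex (text : String) : String :=
  if text = "" then ""
  else pvReplacementsA.foldl (fun s pr => PySem.Str.replace s pr.1 pr.2) text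

-- ===== PORT B =====
-- Source B's compact spec: (mark, letters, replacements) groups; a space in `letters` is skipped
def pvGroupsB : List (String × String × String) := [
  ("'", "aeiou cnsz", "áéíóú ćńśź"),
  ("`", "aeiou", "àèìòù"),
  ("\\\"", "aeiou", "äëïöü"),
  ("^", "aeiou", "âêîôû"),
  ("~", "n", "ñ")]

def pvSpecialsB : List (String × String) := [("c{c}", "ç"), ("aa", "å"), ("o", "ø"), ("ss", "ß")]

-- rows contributed by one group: braced variant before the bare one, in letter order
def pvAccentRows (mark letters repls : List Char) : List (List Char × List Char) :=
  (letters.zip repls).flatMap fun lr =>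
    if lr.1 = ' ' then []
    else
      let core := '\\' :: '\\' :: mark ++ [lr.1]
      [('{' :: core ++ ['}'], [lr.2]), (core, [lr.2])]

-- the generated table: accent groups, specials, dashes, and the bare braces last
def pvTableBC : List (List Char × List Char) :=
  (pvGroupsB.flatMap fun g => pvAccentRows g.1.toList g.2.1.toList g.2.2.toList)
  ++ (pvSpecialsB.flatMap fun sp =>
        let core := '\\' :: '\\' :: sp.1.toList
        [('{' :: core ++ ['}'], sp.2.toList), (core, sp.2.toList)])
  ++ [(['-','-','-'], ['—']), (['-','-'], ['–']), (['{'], []), (['}'], [])]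

-- every pattern of the table is nonempty (needed for pvScan's termination)
theorem pvTableBC_pat_ne_nil : ∀ pr ∈ pvTableBC, pr.1 ≠ [] := by decide

-- the single left-to-right scan of Source B: first matching pattern of the table, else copy the char
def pvScan : List Char → List Char
  | [] => []
  | c :: s =>
    match h : pvTableBC.find? (fun pr => pr.1.isPrefixOf (c :: s)) with
    | some pr => pr.2 ++ pvScan ((c :: s).drop pr.1.length)
    | none => c :: pvScan s
termination_by t => t.length
decreasing_by
  · have hmem := List.mem_of_find?_eq_some h
    have hpred := List.find?_some h
    simp only [] at hpred
    have hpre : pr.1 <+: (c :: s) := List.isPrefixOf_iff_prefix.mp hpred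
    have h1 : pr.1 ≠ [] := pvTableBC_pat_ne_nil pr hmem
    have h2 : pr.1.length ≤ (c :: s).length := hpre.length_le
    have h3 : 0 < pr.1.length := List.length_pos_iff.mpr h1
    simp only [List.length_drop, List.length_cons] at *
    omega
  · simp

def decode_latex_alt (text : String) : String := String.ofList (pvScan text.toList)

-- ===== PRECONDITION & SPEC =====
def Spec_decode_latex (text : String) (out : String) : Prop := out = decode_latex_alt text
instance (text : String) (out : String) : Decidable (Spec_decode_latex text out) := by unfold Spec_decode_latex; infer_instance

-- ===== CLAIM (what is proved, stated in full; the proofs are below) =====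
def Claim_equal_decode_latex : Prop := ∀ (text : String), Dom_decode_latex text → Spec_decode_latex text (decode_latex text)

-- ===== LEMMAS AND PROOFS =====

def pvRep (o : Char) (os new : List Char) : List Char → List Char
  | [] => []
  | c :: s =>
    if (o :: os).isPrefixOf (c :: s) then new ++ pvRep o os new (s.drop os.length)
    else c :: pvRep o os new s
termination_by t => t.length
decreasing_by
  · simp only [List.length_drop, List.length_cons]; omega
  · simp

theorem pvRep_nil (o : Char) (os new : List Char) : pvRep o os new [] = [] := by
  simp [pvRep]

theorem pvGo_eq (o : Char) (os new : List Char) :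
    ∀ (fuel : Nat) (l acc : List Char), l.length ≤ fuel →
      PySem.Chars.replace.go (o :: os) new fuel l acc = acc.reverse ++ pvRep o os new l := by
  intro fuel
  induction fuel with
  | zero =>
    intro l acc hl
    have : l = [] := by cases l <;> simp_all
    subst this
    rw [PySem.Chars.replace.go, pvRep_nil]
  | succ fuel ih =>
    intro l acc hl
    cases l with
    | nil =>
      rw [PySem.Chars.replace.go, pvRep_nil]
      all_goals simp
    | cons c t =>
      rw [PySem.Chars.replace.go]
      rw [pvRep]
      by_cases hp : (o :: os).isPrefixOf (c :: t)
      · rw [if_pos hp, if_pos hp]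
        have hlen : (List.drop (o :: os).length (c :: t)).length ≤ fuel := by
          simp only [List.length_drop, List.length_cons] at *
          omega
        rw [ih _ _ hlen]
        have : List.drop (o :: os).length (c :: t) = t.drop os.length := by simp
        rw [this]
        simp
      · rw [if_neg hp, if_neg hp]
        have hlen : t.length ≤ fuel := by simp at hl; omega
        rw [ih _ _ hlen]
        simp

theorem pvRep_neg {o : Char} {os : List Char} (new : List Char) {c : Char} {s : List Char}
    (h : ¬ (o :: os) <+: (c :: s)) :
    pvRep o os new (c :: s) = c :: pvRep o os new s := by
  rw [pvRep]
  rw [if_neg (by simpa [List.isPrefixOf_iff_prefix] using h)]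

theorem pv_prefix_append_cases {w u v : List Char} (h : w <+: u ++ v) :
    w <+: u ∨ (u <+: w ∧ w.drop u.length <+: v) := by
  induction u generalizing w with
  | nil =>
    right
    exact ⟨List.nil_prefix, by simpa using h⟩
  | cons a u' ih =>
    cases w with
    | nil => left; exact List.nil_prefix
    | cons b w' =>
      rw [List.cons_append, List.cons_prefix_cons] at h
      obtain ⟨rfl, h'⟩ := h
      rcases ih h' with h1 | ⟨h2, h3⟩
      · left; exact List.cons_prefix_cons.mpr ⟨rfl, h1⟩
      · right
        exact ⟨List.cons_prefix_cons.mpr ⟨rfl, h2⟩, by simpa using h3⟩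

def pvAsc (w : List Char) : Prop := ∀ ch ∈ w, ch.toNat ≤ 127
def pvNasc (w : List Char) : Prop := ∀ ch ∈ w, 127 < ch.toNat

theorem pvRep_prefix_reflect {o : Char} {os new : List Char}
    (hn : new ≠ []) (hnw : pvNasc new) :
    ∀ (t w : List Char), pvAsc w → w <+: pvRep o os new t → w <+: t := by
  intro t
  induction t with
  | nil =>
    intro w _ h
    rwa [pvRep_nil] at h
  | cons c s ih =>
    intro w hw h
    by_cases hp : (o :: os) <+: (c :: s)
    · rw [pvRep] at h
      rw [if_pos (List.isPrefixOf_iff_prefix.mpr hp)] at h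
      cases w with
      | nil => exact List.nil_prefix
      | cons b w' =>
        obtain ⟨n0, new', rfl⟩ : ∃ n0 new', new = n0 :: new' := by
          cases new with
          | nil => exact absurd rfl hn
          | cons n0 new' => exact ⟨n0, new', rfl⟩
        rw [List.cons_append, List.cons_prefix_cons] at h
        obtain ⟨rfl, -⟩ := h
        have h1 := hw b (by simp)
        have h2 := hnw b (by simp)
        omega
    · rw [pvRep_neg new hp] at h
      cases w with
      | nil => exact List.nil_prefix
      | cons b w' =>
        rw [List.cons_prefix_cons] at h
        obtain ⟨rfl, h'⟩ := h
        have := ih w' (fun ch hch => hw ch (by simp [hch])) h'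
        exact List.cons_prefix_cons.mpr ⟨rfl, this⟩

theorem pvRep_pass {o : Char} {os : List Char} (new : List Char) {u : List Char} :
    ∀ {X : List Char}, (∀ q, q < u.length → ¬ (o :: os) <+: (u.drop q ++ X)) →
    pvRep o os new (u ++ X) = u ++ pvRep o os new X := by
  induction u with
  | nil => intro X _; rfl
  | cons c u' ih =>
    intro X hq
    have h0 : ¬ (o :: os) <+: (c :: (u' ++ X)) := by
      have := hq 0 (by simp)
      simpa using this
    rw [List.cons_append, pvRep_neg new h0]
    rw [ih (fun q hq' => by simpa using hq (q+1) (by simpa using Nat.succ_lt_succ hq'))]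
    simp

def pvChain (M : List (List Char × List Char)) (t : List Char) : List Char :=
  M.foldl (fun s pr => PySem.Chars.replace s pr.1 pr.2) t

theorem pvChain_cons (pr : List Char × List Char) (M : List (List Char × List Char)) (t : List Char) :
    pvChain (pr :: M) t = pvChain M (PySem.Chars.replace t pr.1 pr.2) := rfl

theorem pvReplace_eq_pvRep (o : Char) (os new s : List Char) :
    PySem.Chars.replace s (o :: os) new = pvRep o os new s := by
  unfold PySem.Chars.replace
  rw [if_neg (by simp)]
  simpa using pvGo_eq o os new s.length s [] le_rfl

def pvGoodP (M : List (List Char × List Char)) : Prop := ∀ pr ∈ M, pr.1 ≠ [] ∧ pvAsc pr.1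
def pvGoodR (M : List (List Char × List Char)) : Prop :=
  ∀ pr ∈ M, (pr.2 ≠ [] → pvNasc pr.2) ∧ (pr.2 = [] → pr.1.length = 1)
def pvDelLast (M : List (List Char × List Char)) : Prop :=
  List.Pairwise (fun a b => a.2 = [] → b.1.length = 1) M

theorem pvChain_block {M : List (List Char × List Char)} (hP : pvGoodP M) (hR : pvGoodR M)
    (hD : pvDelLast M) (p : List Char) :
    ∀ (X : List Char), (∀ pr ∈ M, ∀ q, q < p.length → ¬ pr.1 <+: (p.drop q ++ X)) →
      pvChain M (p ++ X) = p ++ pvChain M X := by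
  induction M with
  | nil => intro X _; rfl
  | cons pr0 M' ih =>
    intro X hq
    obtain ⟨hne, hasc0⟩ := hP pr0 (List.mem_cons_self)
    obtain ⟨o, os, hp0⟩ : ∃ o os, pr0.1 = o :: os := by
      cases h : pr0.1 with
      | nil => exact absurd h hne
      | cons o os => exact ⟨o, os, rfl⟩
    have hstep : PySem.Chars.replace (p ++ X) pr0.1 pr0.2 = p ++ pvRep o os pr0.2 X := by
      rw [hp0, pvReplace_eq_pvRep]
      exact pvRep_pass pr0.2 (fun q hql => by
        have := hq pr0 List.mem_cons_self q hql
        rwa [hp0] at this)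
    rw [pvChain_cons, hstep]
    have hP' : pvGoodP M' := fun pr h => hP pr (List.mem_cons_of_mem _ h)
    have hR' : pvGoodR M' := fun pr h => hR pr (List.mem_cons_of_mem _ h)
    have hD' : pvDelLast M' := (List.pairwise_cons.mp hD).2
    rw [ih hP' hR' hD' (pvRep o os pr0.2 X) ?_]
    · rw [pvChain_cons, hp0, pvReplace_eq_pvRep]
    · intro pr' hm' q hql hpre
      rcases pv_prefix_append_cases hpre with h1 | ⟨h2, h3⟩
      · exact hq pr' (List.mem_cons_of_mem _ hm') q hql (List.prefix_append_of_prefix h1)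
      · by_cases he : pr'.1.drop (List.drop q p).length = []
        · have hlen1 : pr'.1.length ≤ (List.drop q p).length := List.drop_eq_nil_iff.mp he
          have heq : List.drop q p = pr'.1 :=
            List.IsPrefix.eq_of_length h2 (le_antisymm h2.length_le hlen1)
          exact hq pr' (List.mem_cons_of_mem _ hm') q hql
            (heq ▸ List.prefix_append_of_prefix (List.prefix_refl _))
        · by_cases hr0 : pr0.2 = []
          · have h1len : pr'.1.length = 1 := (List.pairwise_cons.mp hD).1 pr' hm' hr0
            have hlt : (List.drop q p).length < pr'.1.length := by
              by_contra hc
              exact he (List.drop_eq_nil_of_le (by omega))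
            simp only [List.length_drop] at hlt
            omega
          · have hnasc : pvNasc pr0.2 := (hR pr0 List.mem_cons_self).1 hr0
            have hasc' : pvAsc (pr'.1.drop (List.drop q p).length) := fun ch hch =>
              (hP pr' (List.mem_cons_of_mem _ hm')).2 ch (List.mem_of_mem_drop hch)
            have h4 := pvRep_prefix_reflect hr0 hnasc X _ hasc' h3
            have h5 : List.drop q p ++ pr'.1.drop (List.drop q p).length = pr'.1 :=
              List.prefix_iff_eq_append.mp h2
            exact hq pr' (List.mem_cons_of_mem _ hm') q hql
              (h5 ▸ (List.prefix_append_right_inj _).mpr h4)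

theorem pvChain_passN {M : List (List Char × List Char)} (hP : pvGoodP M) {u : List Char}
    (hu : pvNasc u) : ∀ (Z : List Char), pvChain M (u ++ Z) = u ++ pvChain M Z := by
  induction M with
  | nil => intro Z; rfl
  | cons pr0 M' ih =>
    intro Z
    obtain ⟨hne, hasc0⟩ := hP pr0 (List.mem_cons_self)
    obtain ⟨o, os, hp0⟩ : ∃ o os, pr0.1 = o :: os := by
      cases h : pr0.1 with
      | nil => exact absurd h hne
      | cons o os => exact ⟨o, os, rfl⟩
    have hstep : PySem.Chars.replace (u ++ Z) pr0.1 pr0.2 = u ++ pvRep o os pr0.2 Z := by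
      rw [hp0, pvReplace_eq_pvRep]
      refine pvRep_pass pr0.2 (fun q hql hpre => ?_)
      rw [List.drop_eq_getElem_cons hql, List.cons_append, List.cons_prefix_cons] at hpre
      obtain ⟨rfl, -⟩ := hpre
      have h1 := hu _ (List.getElem_mem hql)
      have h2 := hasc0 _ (by rw [hp0]; exact List.mem_cons_self)
      omega
    rw [pvChain_cons, hstep]
    have hP' : pvGoodP M' := fun pr h => hP pr (List.mem_cons_of_mem _ h)
    rw [ih hP', pvChain_cons, hp0, pvReplace_eq_pvRep]

theorem pvRep_pos {o : Char} {os : List Char} (new : List Char) {c : Char} {s : List Char}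
    (h : (o :: os) <+: (c :: s)) :
    pvRep o os new (c :: s) = new ++ pvRep o os new (s.drop os.length) := by
  rw [pvRep]
  rw [if_pos (by simpa [List.isPrefixOf_iff_prefix] using h)]

theorem pvRep_block (o : Char) (os new Y : List Char) :
    pvRep o os new ((o :: os) ++ Y) = new ++ pvRep o os new Y := by
  have h : (o :: os) <+: (o :: (os ++ Y)) := ⟨Y, by simp⟩
  rw [List.cons_append, pvRep_pos new h, List.drop_left]

theorem pvChain_append (M N : List (List Char × List Char)) (t : List Char) :
    pvChain (M ++ N) t = pvChain N (pvChain M t) :=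
  List.foldl_append

theorem pvChain_nil {M : List (List Char × List Char)} (hP : pvGoodP M) : pvChain M [] = [] := by
  induction M with
  | nil => rfl
  | cons pr0 M' ih =>
    obtain ⟨hne, -⟩ := hP pr0 List.mem_cons_self
    obtain ⟨o, os, hp0⟩ : ∃ o os, pr0.1 = o :: os := by
      cases h : pr0.1 with
      | nil => exact absurd h hne
      | cons o os => exact ⟨o, os, rfl⟩
    rw [pvChain_cons, hp0, pvReplace_eq_pvRep, pvRep_nil]
    exact ih (fun pr h => hP pr (List.mem_cons_of_mem _ h))

-- B's generated table IS A's hard-coded table, elementwise (this bridges the two ports)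
theorem pvTables_agree :
    pvReplacementsA.map (fun pr => (pr.1.toList, pr.2.toList)) = pvTableBC := by decide

theorem pvGoodP_table : pvGoodP pvTableBC := by
  have hb : pvTableBC.all (fun pr => !pr.1.isEmpty && pr.1.all (fun ch => ch.toNat ≤ 127)) = true := by
    decide
  intro pr hm
  have h1 := List.all_eq_true.mp hb pr hm
  simp only [Bool.and_eq_true, Bool.not_eq_true', List.isEmpty_eq_false_iff] at h1
  refine ⟨h1.1, fun ch hch => ?_⟩
  have := List.all_eq_true.mp h1.2 ch hch
  simpa using this

theorem pvGoodR_table : pvGoodR pvTableBC := by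
  have hb : pvTableBC.all
      (fun pr => (pr.2.isEmpty || pr.2.all (fun ch => 127 < ch.toNat))
        && (!pr.2.isEmpty || pr.1.length == 1)) = true := by
    decide
  intro pr hm
  have h1 := List.all_eq_true.mp hb pr hm
  simp only [Bool.and_eq_true, Bool.or_eq_true, Bool.not_eq_true', List.isEmpty_eq_false_iff,
    List.isEmpty_iff, beq_iff_eq] at h1
  constructor
  · intro hne
    rcases h1.1 with h | h
    · exact absurd h hne
    · exact fun ch hch => by simpa using List.all_eq_true.mp h ch hch
  · intro hemp
    rcases h1.2 with h | h
    · exact absurd hemp h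
    · exact h

set_option maxRecDepth 2048 in
theorem pvDelLast_table : pvDelLast pvTableBC := by unfold pvDelLast; decide

-- overlap facts between table patterns: no earlier pattern sits strictly inside a later one,
-- and the only spanning configuration is "---" across "--"
set_option maxRecDepth 2048 in
theorem pvOverlap : List.Pairwise (fun a b : List Char × List Char =>
    ∀ q, q < b.1.length → 1 ≤ q →
      ¬ a.1 <+: b.1.drop q ∧ (b.1.drop q <+: a.1 → a.1 = ['-','-','-'] ∧ b.1 = ['-','-'])) pvTableBC := by
  decide

theorem pvScan_nil : pvScan [] = [] := by rw [pvScan]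

theorem pvScan_cons_none {c : Char} {s : List Char}
    (h : pvTableBC.find? (fun pr => pr.1.isPrefixOf (c :: s)) = none) :
    pvScan (c :: s) = c :: pvScan s := by
  rw [pvScan]
  split <;> simp_all

theorem pvScan_cons_some {c : Char} {s : List Char} {pr : List Char × List Char}
    (h : pvTableBC.find? (fun pr => pr.1.isPrefixOf (c :: s)) = some pr) :
    pvScan (c :: s) = pr.2 ++ pvScan ((c :: s).drop pr.1.length) := by
  rw [pvScan]
  split <;> simp_all

-- the heart: A's 62 sequential passes compute B's single scan
theorem pvChain_eq_scan : ∀ (t : List Char), pvChain pvTableBC t = pvScan t := by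
  have main : ∀ (n : Nat) (t : List Char), t.length ≤ n → pvChain pvTableBC t = pvScan t := by
    intro n
    induction n with
    | zero =>
      intro t ht
      have : t = [] := by cases t <;> simp_all
      subst this
      rw [pvChain_nil pvGoodP_table, pvScan_nil]
    | succ n ih =>
      intro t ht
      cases t with
      | nil => rw [pvChain_nil pvGoodP_table, pvScan_nil]
      | cons c s =>
        cases h : pvTableBC.find? (fun pr => pr.1.isPrefixOf (c :: s)) with
        | none =>
          have hfail : ∀ pr ∈ pvTableBC, ¬ pr.1 <+: (c :: s) := by
            intro pr hm
            have := List.find?_eq_none.mp h pr hm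
            simpa [List.isPrefixOf_iff_prefix] using this
          have hq : ∀ pr ∈ pvTableBC, ∀ q, q < ([c] : List Char).length →
              ¬ pr.1 <+: (([c] : List Char).drop q ++ s) := by
            intro pr hm q hql
            have hq0 : q = 0 := by simpa using hql
            subst hq0
            simpa using hfail pr hm
          have hblock := pvChain_block pvGoodP_table pvGoodR_table pvDelLast_table [c] s hq
          simp only [List.singleton_append] at hblock
          rw [hblock, pvScan_cons_none h, ih s (by simp at ht; omega)]
        | some pr =>
          obtain ⟨hpred, L1, L2, hdec, hfail1⟩ := List.find?_eq_some_iff_append.mp h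
          have hpre : pr.1 <+: (c :: s) := List.isPrefixOf_iff_prefix.mp hpred
          obtain ⟨u, hu⟩ := hpre
          have hprmem : pr ∈ pvTableBC := by
            rw [hdec]; exact List.mem_append_right _ List.mem_cons_self
          obtain ⟨hne, hascp⟩ := pvGoodP_table pr hprmem
          obtain ⟨o, os, hp0⟩ : ∃ o os, pr.1 = o :: os := by
            cases hx : pr.1 with
            | nil => exact absurd hx hne
            | cons o os => exact ⟨o, os, rfl⟩
          have hmemL1 : ∀ x ∈ L1, x ∈ pvTableBC := fun x hx => by
            rw [hdec]; exact List.mem_append_left _ hx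
          have hmemL2 : ∀ x ∈ L2, x ∈ pvTableBC := fun x hx => by
            rw [hdec]; exact List.mem_append_right _ (List.mem_cons_of_mem _ hx)
          have hP1 : pvGoodP L1 := fun x hx => pvGoodP_table x (hmemL1 x hx)
          have hR1 : pvGoodR L1 := fun x hx => pvGoodR_table x (hmemL1 x hx)
          have hPL2 : pvGoodP L2 := fun x hx => pvGoodP_table x (hmemL2 x hx)
          have hD1 : pvDelLast L1 := by
            have hsub : L1.Sublist pvTableBC := by
              rw [hdec]; exact List.sublist_append_left _ _
            exact List.Pairwise.sublist hsub pvDelLast_table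
          have hcond : ∀ x ∈ L1, ∀ q, q < pr.1.length → 1 ≤ q →
              ¬ x.1 <+: pr.1.drop q ∧
              (pr.1.drop q <+: x.1 → x.1 = ['-','-','-'] ∧ pr.1 = ['-','-']) := by
            have hpw := pvOverlap
            rw [hdec] at hpw
            have h2 := (List.pairwise_append.mp hpw).2.2
            intro x hx
            exact h2 x hx pr List.mem_cons_self
          have hfailL1 : ∀ x ∈ L1, ¬ x.1 <+: (c :: s) := by
            intro x hx
            have hb : x.1.isPrefixOf (c :: s) = false := by simpa using hfail1 x hx
            intro hcon
            exact absurd (List.isPrefixOf_iff_prefix.mpr hcon) (by simp [hb])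
          have hq : ∀ x ∈ L1, ∀ q, q < pr.1.length → ¬ x.1 <+: (pr.1.drop q ++ u) := by
            intro x hx q hql hcontra
            rcases Nat.eq_zero_or_pos q with rfl | hq1
            · rw [List.drop_zero, hu] at hcontra
              exact hfailL1 x hx hcontra
            · rcases pv_prefix_append_cases hcontra with h1 | ⟨h2, h3⟩
              · exact (hcond x hx q hql hq1).1 h1
              · by_cases he : x.1.drop (pr.1.drop q).length = []
                · have hxeq : x.1 = pr.1.drop q :=
                    (List.IsPrefix.eq_of_length h2
                      (le_antisymm h2.length_le (List.drop_eq_nil_iff.mp he))).symm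
                  exact (hcond x hx q hql hq1).1 (hxeq ▸ List.prefix_refl _)
                · obtain ⟨hx3, hp2⟩ := (hcond x hx q hql hq1).2 h2
                  have hq1' : q = 1 := by rw [hp2] at hql; simp at hql; omega
                  subst hq1'
                  rw [hx3, hp2] at h3
                  simp only [List.length_drop] at h3
                  norm_num at h3
                  obtain ⟨u2, hu2⟩ := h3
                  apply hfailL1 x hx
                  rw [hx3, ← hu, hp2, ← hu2]
                  exact ⟨'-' :: u2, rfl⟩
          have hstepa : pvChain L1 (pr.1 ++ u) = pr.1 ++ pvChain L1 u :=
            pvChain_block hP1 hR1 hD1 pr.1 u hq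
          have hlen_u : u.length ≤ n := by
            have hL := congrArg List.length hu
            rw [hp0] at hL
            simp only [List.length_append, List.length_cons] at hL ht
            omega
          have ihu := ih u hlen_u
          have hdrop : (c :: s).drop pr.1.length = u := by
            rw [← hu, List.drop_left]
          calc pvChain pvTableBC (c :: s)
              = pvChain (pr :: L2) (pvChain L1 (c :: s)) := by rw [hdec, pvChain_append]
            _ = pvChain L2 (PySem.Chars.replace (pr.1 ++ pvChain L1 u) pr.1 pr.2) := by
                  rw [← hu, hstepa, pvChain_cons]
            _ = pvChain L2 (pr.2 ++ pvRep o os pr.2 (pvChain L1 u)) := by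
                  rw [hp0, pvReplace_eq_pvRep, pvRep_block]
            _ = pr.2 ++ pvChain L2 (pvRep o os pr.2 (pvChain L1 u)) := by
                  by_cases hr : pr.2 = []
                  · rw [hr]; simp
                  · exact pvChain_passN hPL2 ((pvGoodR_table pr hprmem).1 hr) _
            _ = pr.2 ++ pvChain pvTableBC u := by
                  rw [hdec, pvChain_append, pvChain_cons, hp0, pvReplace_eq_pvRep]
            _ = pr.2 ++ pvScan u := by rw [ihu]
            _ = pvScan (c :: s) := by rw [pvScan_cons_some h, hdrop]
  exact fun t => main t.length t le_rfl

theorem pvFoldl_toList (ps : List (String × String)) (s : String) :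
    (ps.foldl (fun a pr => PySem.Str.replace a pr.1 pr.2) s).toList
      = pvChain (ps.map (fun pr => (pr.1.toList, pr.2.toList))) s.toList := by
  induction ps generalizing s with
  | nil => rfl
  | cons pr ps ih =>
    simp only [List.foldl_cons, List.map_cons, pvChain_cons]
    rw [ih, PySem.Str.toList_replace]

-- ===== VERDICT (by name: the statement is the Claim_ definition above) =====
theorem decode_latex_spec : Claim_equal_decode_latex := by
  intro text _
  unfold Spec_decode_latex decode_latex decode_latex_alt
  by_cases h : text = ""
  · subst h
    rw [if_pos rfl]
    have h0 : ("" : String).toList = [] := rfl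
    rw [h0, pvScan_nil]
  · rw [if_neg h]
    have h1 : (pvReplacementsA.foldl (fun s pr => PySem.Str.replace s pr.1 pr.2) text).toList
        = pvScan text.toList := by
      rw [pvFoldl_toList, pvTables_agree, pvChain_eq_scan]
    calc pvReplacementsA.foldl (fun s pr => PySem.Str.replace s pr.1 pr.2) text
        = String.ofList (pvReplacementsA.foldl (fun s pr => PySem.Str.replace s pr.1 pr.2) text).toList := by
          rw [String.ofList_toList]
      _ = String.ofList (pvScan text.toList) := by rw [h1]
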